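-- pv_equiv track=rewrite | github.com/cs-learning-every-day/cs61a | disc/disc04/index.py | check_hole_number
-- ===== SOURCE A (Python) =====
-- def check_hole_number(n):
--     if (n < 100):
--         return True
--     low = n % 10
--     middle = (n//10) % 10
--     high = (n//100) % 10
--     if (low <= middle) or (middle >= high):
--         return False
--     return check_hole_number(n//100)
-- ===== SOURCE B (Python) =====
-- def check_hole_number(n):
--     while n >= 100:
--         low = n % 10
--         n //= 10
--         middle = n % 10
--         n //= 10
--         if not (low > middle < n % 10):
--             return False
--     return True
-- ===== Notes on version B (the rewrite author's own statement) =====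
-- stated objective: simpler
-- what changed: Replaced the tail recursion by an iterative while-loop that strips two digits per step from a single mutable n, with the digit test written as one chained comparison low < middle < high.
import Mathlib
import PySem

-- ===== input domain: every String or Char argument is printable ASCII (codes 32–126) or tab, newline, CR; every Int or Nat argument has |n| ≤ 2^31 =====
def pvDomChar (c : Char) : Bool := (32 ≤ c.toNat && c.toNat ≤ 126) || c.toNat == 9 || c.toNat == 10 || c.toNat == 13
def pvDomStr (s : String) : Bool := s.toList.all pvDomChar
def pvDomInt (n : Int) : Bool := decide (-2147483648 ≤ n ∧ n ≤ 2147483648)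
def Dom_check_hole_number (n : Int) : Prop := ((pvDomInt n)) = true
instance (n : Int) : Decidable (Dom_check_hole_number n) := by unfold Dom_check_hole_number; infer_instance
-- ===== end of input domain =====

-- B rewrites A's tail recursion as an iterative while-loop over one mutable n (simpler decomposition, same cost).

-- ===== PORT A =====
-- A's recursion, with a fuel counter as totality guard (fuel n.toNat+1 always suffices, proved below)
def checkHoleFuel : Nat → Int → Bool
  | 0, _ => true
  | f + 1, n =>
    if n < 100 then true
    else
      let low := PySem.Int.mod n 10
      let middle := PySem.Int.mod (PySem.Int.floordiv n 10) 10
      let high := PySem.Int.mod (PySem.Int.floordiv n 100) 10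
      if low ≤ middle ∨ middle ≥ high then false
      else checkHoleFuel f (PySem.Int.floordiv n 100)

def check_hole_number (n : Int) : Bool := checkHoleFuel (n.toNat + 1) n

-- ===== PORT B =====
-- the while-loop of Source B as a loop function over the mutated state n, with the same fuel guard
def holeLoopFuel : Nat → Int → Bool
  | 0, _ => true
  | f + 1, n =>
    if n ≥ 100 then
      let low := PySem.Int.mod n 10
      let n1 := PySem.Int.floordiv n 10
      let middle := PySem.Int.mod n1 10
      let n2 := PySem.Int.floordiv n1 10
      if ¬ (low > middle ∧ middle < PySem.Int.mod n2 10) then false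
      else holeLoopFuel f n2
    else true

def check_hole_number_alt (n : Int) : Bool := holeLoopFuel (n.toNat + 1) n

-- ===== PRECONDITION & SPEC =====
def Spec_check_hole_number (n : Int) (out : Bool) : Prop := out = check_hole_number_alt n
instance (n : Int) (out : Bool) : Decidable (Spec_check_hole_number n out) := by unfold Spec_check_hole_number; infer_instance

-- ===== CLAIM (what is proved, stated in full; the proofs are below) =====
def Claim_equal_check_hole_number : Prop := ∀ (n : Int), Dom_check_hole_number n → Spec_check_hole_number n (check_hole_number n)

-- ===== LEMMAS AND PROOFS =====
theorem hole_eq : ∀ (f : Nat) (n : Int), n.toNat < f → checkHoleFuel f n = holeLoopFuel f n := by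
  intro f
  induction f with
  | zero => intro n h; omega
  | succ f ih =>
    intro n h
    rw [checkHoleFuel, holeLoopFuel]
    by_cases hlt : n < 100
    · simp only [hlt, if_true, show ¬ n ≥ 100 by omega, if_false]
    · have hge : n ≥ 100 := by omega
      have hd10 := PySem.Int.floordiv_eq_ediv_of_pos (a := n) (b := 10) (by norm_num)
      have hd100 := PySem.Int.floordiv_eq_ediv_of_pos (a := n) (b := 100) (by norm_num)
      have hd10' := PySem.Int.floordiv_eq_ediv_of_pos (a := n / 10) (b := 10) (by norm_num)
      have hcomp : PySem.Int.floordiv (PySem.Int.floordiv n 10) 10 = PySem.Int.floordiv n 100 := by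
        rw [hd10, hd10', hd100]; omega
      simp only [hlt, if_false, hge, if_true, hcomp]
      by_cases hc : PySem.Int.mod n 10 ≤ PySem.Int.mod (PySem.Int.floordiv n 10) 10 ∨
          PySem.Int.mod (PySem.Int.floordiv n 10) 10 ≥ PySem.Int.mod (PySem.Int.floordiv n 100) 10
      · rw [if_pos hc, if_pos]
        omega
      · rw [if_neg (by omega), if_neg (by omega)]
        exact ih _ (by rw [hd100]; omega)

-- ===== VERDICT (by name: the statement is the Claim_ definition above) =====
theorem check_hole_number_spec : Claim_equal_check_hole_number := by
  intro n _
  unfold Spec_check_hole_number check_hole_number_alt check_hole_number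
  exact hole_eq _ n (by omega)
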